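-- pv_equiv track=rewrite | github.com/kseenyoung/programmers | level1/신고 결과 받기.py | solution
-- ===== SOURCE A (Python) =====
-- def solution(id_list, report, k):
--
--     user = {id: 0 for id in id_list}  # 유저 별 통보 받은 횟수
--     score = {id: set() for id in id_list}  # 유저 별 신고한 사람
--
--     for repo in report:
--         a, b = repo.split()
--         score[b].add(a)
--
--     for sco in score:
--         if len(score[sco]) >= k:
--             for u in score[sco]:
--                 user[u] += 1
--
--     return [s for s in user.values()]
-- ===== SOURCE B (Python) =====
-- def solution(id_list, report, k):
--     pairs = {tuple(r.split()) for r in report}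
--
--     def distinct_reporters(b):
--         return sum(1 for _, b2 in pairs if b2 == b)
--
--     return [sum(1 for a, b in pairs if a == i and distinct_reporters(b) >= k)
--             for i in dict.fromkeys(id_list)]
-- ===== Notes on version B (the rewrite author's own statement) =====
-- stated objective: simpler
-- what changed: B is a pure two-liner: instead of A's two mutated dicts (per-target reporter sets, then an outer loop over targets with an inner increment loop over each set), B dedups the split reports into one pair set and returns, per distinct id in order, a direct count of its pairs whose target has >= k distinct reporters; it trades A's linear dict passes for quadratic scans over the pair set.
import Mathlib
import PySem

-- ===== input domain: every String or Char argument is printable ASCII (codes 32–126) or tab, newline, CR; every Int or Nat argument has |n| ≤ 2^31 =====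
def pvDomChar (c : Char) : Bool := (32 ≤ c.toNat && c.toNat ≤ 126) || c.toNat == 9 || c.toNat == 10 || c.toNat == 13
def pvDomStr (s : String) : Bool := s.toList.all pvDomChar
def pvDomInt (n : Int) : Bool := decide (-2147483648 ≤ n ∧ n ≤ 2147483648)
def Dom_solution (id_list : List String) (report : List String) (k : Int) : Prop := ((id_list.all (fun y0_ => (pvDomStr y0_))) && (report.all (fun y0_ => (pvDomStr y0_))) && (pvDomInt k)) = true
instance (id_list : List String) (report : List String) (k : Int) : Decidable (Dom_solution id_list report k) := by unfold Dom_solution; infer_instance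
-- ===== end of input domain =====

-- B drops A's two mutated dicts (per-target reporter sets, then nested increment loops) for a
-- pure form: one deduplicated pair set and, per distinct id, a direct count of its pairs whose
-- target has >= k distinct reporters (simpler decomposition; no asymptotic speed claim).
-- ===== PORT A =====
def solution (id_list : List String) (report : List String) (k : Int) : List Int :=
  let user : PySem.Dict String Int := id_list.foldl (fun d i => d.insert i 0) PySem.Dict.empty
  let score : PySem.Dict String (PySem.Set String) :=
    id_list.foldl (fun d i => d.insert i PySem.Set.empty) PySem.Dict.empty
  let score := report.foldl (fun d repo =>
      let ts := PySem.Str.split₀ repo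
      if h : ts.length = 2 then
        d.insert (ts[1]'(by omega))
          (PySem.Set.add (d.getD (ts[1]'(by omega)) PySem.Set.empty) (ts[0]'(by omega)))
      else d) score
      -- a, b = repo.split(): any other shape raises ValueError; score[b] raises KeyError for
      -- unregistered b: both outside Pre_ (getD+insert re-inserts the updated set at b's position)
  let user := score.keys.foldl (fun u sco =>
      if k ≤ ((score.getD sco PySem.Set.empty).length : Int) then
        (score.getD sco PySem.Set.empty).foldl (fun u2 v => u2.modify v 0 (· + 1)) u
      else u) user
      -- user[u] += 1 raises KeyError for an unregistered reporter u of a qualifying target: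
      -- outside Pre_ (modify is a no-op there, never reached inside Pre_)
  user.values

-- ===== PORT B =====
def solution_alt (id_list : List String) (report : List String) (k : Int) : List Int :=
  -- pairs = {tuple(r.split()) for r in report}; a tuple of split tokens is ported as its token list
  let pairs : PySem.Set (List String) :=
    PySem.Set.ofList (report.map (fun r => PySem.Str.split₀ r))
  -- sum(1 for _, b2 in pairs if b2 == b): the unpacking reads position 1; exact whenever every
  -- entry has two tokens (inside Pre_); the sum of a 0/1 generator over a set is a countP
  let distinct_reporters : String → Int := fun b =>
    (pairs.countP (fun q => q.getD 1 "" == b) : Int)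
  -- [... for i in dict.fromkeys(id_list)]: first occurrences of the ids, in order
  (PySem.List.dedup id_list).map (fun i =>
    (pairs.countP (fun p => p.getD 0 "" == i && decide (k ≤ distinct_reporters (p.getD 1 ""))) : Int))

-- ===== PRECONDITION & SPEC =====
-- number of distinct (reporter, target) pairs in report whose target token is b (input-only helper)
def pvCnt (report : List String) (b : String) : Int :=
  ((PySem.Set.ofList ((report.map (fun r => PySem.Str.split₀ r)).filter
      (fun ts => ts.getD 1 "" == b))).length : Int)

-- Pre_ excludes exactly the inputs where A raises: a report entry that does not split into two
-- tokens (ValueError), a reported user outside id_list (KeyError at score[b]), and a reporter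
-- outside id_list whose target gathers >= k distinct reporters (KeyError at user[u] += 1); it
-- admits unregistered reporters whose target stays below k, where A returns normally.
def Pre_solution (id_list : List String) (report : List String) (k : Int) : Prop :=
  (report.all (fun r =>
    ((PySem.Str.split₀ r).length == 2) &&
    id_list.contains ((PySem.Str.split₀ r).getD 1 "") &&
    (id_list.contains ((PySem.Str.split₀ r).getD 0 "") ||
      decide (pvCnt report ((PySem.Str.split₀ r).getD 1 "") < k)))) = true
instance (id_list : List String) (report : List String) (k : Int) : Decidable (Pre_solution id_list report k) := by unfold Pre_solution; infer_instance
def pvWitness_solution : List String × List String × Int :=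
  (["muzi", "frodo", "apeach", "neo"],
   ["muzi frodo", "apeach frodo", "frodo neo", "muzi neo", "apeach muzi"], 2)

def Spec_solution (id_list : List String) (report : List String) (k : Int) (out : List Int) : Prop := out = solution_alt id_list report k
instance (id_list : List String) (report : List String) (k : Int) (out : List Int) : Decidable (Spec_solution id_list report k out) := by unfold Spec_solution; infer_instance

-- ===== CLAIM (what is proved, stated in full; the proofs are below) =====
def Claim_equal_solution : Prop := ∀ (id_list : List String) (report : List String) (k : Int), Dom_solution id_list report k → Pre_solution id_list report k → Spec_solution id_list report k (solution id_list report k)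

-- ===== LEMMAS AND PROOFS =====

-- parsed pair of one report entry (proof-side view of `a, b = repo.split()`)
def pvParse (r : String) : String × String :=
  ((PySem.Str.split₀ r).getD 0 "", (PySem.Str.split₀ r).getD 1 "")

-- a parsed pair rebuilt as its token list (proof-side view of B's tuples)
def pvT (p : String × String) : List String := [p.1, p.2]

-- reporters of b, as a list with duplicates, in report order
def pvRl (P : List (String × String)) (b : String) : List String :=
  (P.filter (fun p => p.2 == b)).map Prod.fst

-- distinct reporters of b (= A's score[b])
def pvS (P : List (String × String)) (b : String) : PySem.Set String :=
  PySem.Set.ofList (pvRl P b)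

-- a dict built by inserting value 0 for every key reads 0 everywhere
theorem pv_getD_insert_const {ν : Type} [DecidableEq ν] (l : List String) (v0 : ν)
    (d : PySem.Dict String ν) (x : String) (h : d.getD x v0 = v0) :
    (l.foldl (fun d i => d.insert i v0) d).getD x v0 = v0 := by
  induction l generalizing d with
  | nil => exact h
  | cons i l ih =>
    simp only [List.foldl_cons]
    exact ih _ (by rw [PySem.Dict.getD_insert]; split_ifs <;> simp [h])

-- updating a set with elements it already has changes nothing
theorem pv_update_of_subset {α : Type} [BEq α] [LawfulBEq α] (s : PySem.Set α) (xs : List α)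
    (h : ∀ x ∈ xs, x ∈ s) : PySem.Set.update s xs = s := by
  rw [PySem.Set.update_eq_append_filter]
  have : List.filter (fun y => !s.contains y) (PySem.Set.ofList xs) = [] := by
    rw [List.filter_eq_nil_iff]
    intro y hy
    have := h y ((PySem.Set.mem_ofList xs y).mp hy)
    simp [this]
  rw [this, List.append_nil]

-- A's reporter-set loop: score[b] accumulates exactly the reporters of b
theorem pv_score_getD (l : List (String × String)) (d : PySem.Dict String (PySem.Set String))
    (b : String) :
    (l.foldl (fun d p => d.insert p.2 (PySem.Set.add (d.getD p.2 PySem.Set.empty) p.1)) d).getD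
        b PySem.Set.empty
      = PySem.Set.update (d.getD b PySem.Set.empty) (pvRl l b) := by
  induction l generalizing d with
  | nil => simp [pvRl, PySem.Set.update_nil]
  | cons p l ih =>
    simp only [List.foldl_cons]
    rw [ih]
    by_cases hb : p.2 = b
    · subst hb
      rw [PySem.Dict.getD_insert]
      simp [pvRl, PySem.Set.update_cons]
    · rw [PySem.Dict.getD_insert]
      simp [pvRl, hb, Ne.symm hb]

-- dedup commutes with filter
theorem pv_ofList_filter {α : Type} [BEq α] [LawfulBEq α] (q : α → Bool) (l : List α) :
    PySem.Set.ofList (l.filter q) = (PySem.Set.ofList l).filter q := by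
  induction l with
  | nil => simp
  | cons x l ih =>
    rw [List.filter_cons, PySem.Set.ofList_cons]
    by_cases hq : q x = true
    · simp only [hq, if_true]
      rw [PySem.Set.ofList_cons, ih, List.filter_cons, hq, if_pos rfl]
      congr 1
      simp only [PySem.Set.discard, List.filter_filter]
      exact List.filter_congr (fun y _ => by rw [Bool.and_comm])
    · simp only [hq, if_false, Bool.false_eq_true]
      rw [ih, List.filter_cons, if_neg (by simp [hq])]
      simp only [PySem.Set.discard, List.filter_filter]
      refine (List.filter_congr (fun y hy => ?_)).symm
      by_cases hyx : y = x
      · subst hyx; simp [hq]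
      · simp [hyx]

-- dedup commutes with an injective map
theorem pv_ofList_map_inj {α β : Type} [BEq α] [LawfulBEq α] [BEq β] [LawfulBEq β]
    (f : α → β) (hf : Function.Injective f) (l : List α) :
    PySem.Set.ofList (l.map f) = (PySem.Set.ofList l).map f := by
  induction l with
  | nil => simp
  | cons x l ih =>
    rw [List.map_cons, PySem.Set.ofList_cons, PySem.Set.ofList_cons, List.map_cons, ih]
    congr 1
    simp only [PySem.Set.discard, List.filter_map]
    congr 1
    refine List.filter_congr (fun y _ => ?_)
    simp only [Function.comp_apply]
    by_cases hyx : y = x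
    · subst hyx; simp
    · have : f y ≠ f x := fun h => hyx (hf h)
      simp [hyx, this]

-- dedup commutes with projecting the first component when all seconds agree
theorem pv_ofList_map_fst (b : String) (l : List (String × String))
    (hl : ∀ p ∈ l, p.2 = b) :
    PySem.Set.ofList (l.map Prod.fst) = (PySem.Set.ofList l).map Prod.fst := by
  induction l with
  | nil => simp
  | cons p l ih =>
    rw [List.map_cons, PySem.Set.ofList_cons, PySem.Set.ofList_cons, List.map_cons]
    rw [ih (fun p hp => hl p (List.mem_cons_of_mem _ hp))]
    congr 1
    simp only [PySem.Set.discard, List.filter_map]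
    congr 1
    refine List.filter_congr (fun y hy => ?_)
    have hy2 : y.2 = p.2 := by
      rw [hl y (List.mem_cons_of_mem _ ((PySem.Set.mem_ofList l y).mp hy)),
          hl p List.mem_cons_self]
    simp only [Function.comp_apply]
    by_cases h1 : y.1 = p.1
    · have : y = p := Prod.ext h1 hy2
      simp [this]
    · have : y ≠ p := fun h => h1 (by rw [h])
      simp [h1, this]

-- A's notify loop, counted: each x gets one notification per inner pass containing it
theorem pv_outer_getD (S : String → PySem.Set String) (c : String → Prop) [DecidablePred c]
    (l : List String) (u : PySem.Dict String Int) (i : String) :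
    (l.foldl (fun u b =>
        if c b then (S b).foldl (fun u2 v => u2.modify v 0 (· + 1)) u else u) u).getD i 0
      = u.getD i 0 + (((l.filter (fun b => decide (c b))).flatMap S).count i : Int) := by
  induction l generalizing u with
  | nil => simp
  | cons b l ih =>
    simp only [List.foldl_cons, List.filter_cons]
    by_cases hc : c b
    · rw [if_pos hc, ih, PySem.Dict.getD_foldl_modify_add_one]
      simp only [hc, decide_true, if_pos, List.flatMap_cons, List.count_append]
      push_cast
      ring
    · rw [if_neg hc, ih]
      simp [hc]

-- A's notify loop keeps the key list unchanged when every notified user of a QUALIFYING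
-- reported user is a key (Pre_ guarantees nothing about the other reporter sets)
theorem pv_outer_keys (S : String → PySem.Set String) (c : String → Prop) [DecidablePred c]
    (l : List String) :
    ∀ u : PySem.Dict String Int, (∀ b, c b → ∀ a ∈ S b, a ∈ u.keys) →
    (l.foldl (fun u b =>
        if c b then (S b).foldl (fun u2 v => u2.modify v 0 (· + 1)) u else u) u).keys
      = u.keys := by
  induction l with
  | nil => intro u _; rfl
  | cons b l ih =>
    intro u h
    simp only [List.foldl_cons]
    by_cases hc : c b
    · rw [if_pos hc]
      have hk : ((S b).foldl (fun u2 v => u2.modify v 0 (· + 1)) u).keys = u.keys := by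
        have h1 : ((S b).foldl (fun u2 v => u2.modify v 0 (· + 1)) u).keys
            = PySem.Set.update u.keys (S b) :=
          PySem.Dict.keys_foldl_modify (S b) 0 (fun _ _ v => v + 1) u
        rw [h1, pv_update_of_subset _ _ (h b hc)]
      rw [ih _ (fun b' hc' a ha => by rw [hk]; exact h b' hc' a ha), hk]
    · rw [if_neg hc]
      exact ih u h

-- flatMap of a guarded block is a flatMap over the filtered list
theorem pv_flatMap_ite {α β : Type} (c : α → Bool) (f : α → List β) (l : List α) :
    l.flatMap (fun b => if c b then f b else []) = (l.filter c).flatMap f := by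
  induction l with
  | nil => rfl
  | cons x l ih =>
    simp only [List.flatMap_cons, List.filter_cons]
    by_cases hx : c x = true
    · simp [hx, ih]
    · simp [hx, ih]

-- core recount: the deduplicated pairs, grouped by reported user, are A's reporter sets
theorem pv_perm (id_list : List String) (P : List (String × String))
    (hP2 : ∀ p ∈ P, p.2 ∈ id_list) :
    (PySem.Set.ofList P).Perm
      ((PySem.Set.ofList id_list).flatMap
        (fun b => (pvS P b).map (fun a => (a, b)))) := by
  have hinj : ∀ b : String, Function.Injective (fun a : String => (a, b)) := by
    intro b a a' h
    simpa [Prod.ext_iff] using h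
  rw [List.perm_ext_iff_of_nodup (PySem.Set.nodup_ofList P) ?_]
  · intro p
    rw [PySem.Set.mem_ofList, List.mem_flatMap]
    constructor
    · intro hp
      refine ⟨p.2, (PySem.Set.mem_ofList _ _).mpr (hP2 p hp), ?_⟩
      refine List.mem_map.mpr ⟨p.1, ?_, rfl⟩
      rw [pvS, PySem.Set.mem_ofList, pvRl]
      exact List.mem_map.mpr ⟨p, List.mem_filter.mpr ⟨hp, by simp⟩, rfl⟩
    · rintro ⟨b, _, hpb⟩
      obtain ⟨a, ha, hap⟩ := List.mem_map.mp hpb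
      rw [pvS, PySem.Set.mem_ofList, pvRl] at ha
      obtain ⟨p', hp', hp'a⟩ := List.mem_map.mp ha
      have h2 := List.mem_filter.mp hp'
      have : p' = p := by
        have hb : p'.2 = b := by simpa using h2.2
        rw [← hap, ← hp'a, ← hb]
      rw [← this]
      exact h2.1
  · rw [List.nodup_flatMap]
    constructor
    · intro b _
      exact (PySem.Set.nodup_ofList _).map (hinj b)
    · have hnd : (PySem.Set.ofList id_list).Nodup := PySem.Set.nodup_ofList _
      refine hnd.imp fun {b b'} hbb' p hp hp' => ?_
      obtain ⟨a, _, rfl⟩ := List.mem_map.mp hp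
      obtain ⟨a', _, h⟩ := List.mem_map.mp hp'
      have h2 : a' = a ∧ b' = b := by simpa [Prod.ext_iff] using h
      exact hbb' h2.2.symm

-- distinct-pair count per reported user = size of A's reporter set
theorem pv_cnt_eq (P : List (String × String)) (b : String) :
    (((PySem.Set.ofList P).map Prod.snd).count b : Int) = ((pvS P b).length : Int) := by
  have h1 : ((PySem.Set.ofList P).map Prod.snd).count b
      = ((PySem.Set.ofList P).filter (fun p => p.2 == b)).length := by
    rw [List.count_eq_countP, List.countP_map, List.countP_eq_length_filter]
    rfl
  have h2 : (PySem.Set.ofList P).filter (fun p => p.2 == b)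
      = PySem.Set.ofList (P.filter (fun p => p.2 == b)) :=
    (pv_ofList_filter _ _).symm
  have h3 : pvS P b = (PySem.Set.ofList (P.filter (fun p => p.2 == b))).map Prod.fst := by
    rw [pvS, pvRl]
    exact pv_ofList_map_fst b _ (fun p hp => by simpa using (List.mem_filter.mp hp).2)
  rw [h1, h2, h3, List.length_map]

-- the two tallies agree: B's filtered pair count recounts A's nested notify loops
theorem pv_count_transfer (id_list : List String) (P : List (String × String))
    (hP2 : ∀ p ∈ P, p.2 ∈ id_list) (c : String → Bool) (i : String) :
    (((PySem.Set.ofList P).filter (fun p => c p.2)).map Prod.fst).count i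
      = (((PySem.Set.ofList id_list).filter c).flatMap (pvS P)).count i := by
  have hperm := ((pv_perm id_list P hP2).filter (fun p => c p.2)).map Prod.fst
  rw [hperm.count_eq, List.filter_flatMap]
  have hblk : ∀ b : String,
      (((pvS P b).map (fun a => (a, b))).filter (fun p => c p.2)).map Prod.fst
        = if c b then pvS P b else [] := by
    intro b
    rw [List.filter_map]
    by_cases hb : c b = true
    · rw [if_pos hb]
      have : ((pvS P b).filter ((fun p : String × String => c p.2) ∘ (fun a => (a, b))))
          = pvS P b := List.filter_eq_self.mpr (fun a _ => by simpa using hb)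
      rw [this, List.map_map]
      simp [Function.comp_def]
    · rw [if_neg hb]
      have : ((pvS P b).filter ((fun p : String × String => c p.2) ∘ (fun a => (a, b))))
          = [] := List.filter_eq_nil_iff.mpr (fun a _ => by simpa using hb)
      simp [this]
  rw [List.map_flatMap]
  calc ((PySem.Set.ofList id_list).flatMap
          (fun b => (((pvS P b).map (fun a => (a, b))).filter (fun p => c p.2)).map Prod.fst)).count i
      = ((PySem.Set.ofList id_list).flatMap (fun b => if c b then pvS P b else [])).count i := by
        simp only [hblk]
    _ = (((PySem.Set.ofList id_list).filter c).flatMap (pvS P)).count i := by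
        rw [pv_flatMap_ite]

-- pvT is injective
theorem pv_pvT_inj : Function.Injective pvT := by
  intro p q h
  simp only [pvT, List.cons.injEq, and_true] at h
  exact Prod.ext h.1 h.2

-- inside Pre_, the token lists of the reports are the rebuilt parsed pairs
theorem pv_split_eq_map (report : List String)
    (hsplit : ∀ r ∈ report, ∃ a b, PySem.Str.split₀ r = [a, b]) :
    report.map (fun r => PySem.Str.split₀ r) = (report.map pvParse).map pvT := by
  rw [List.map_map]
  refine List.map_congr_left (fun r hr => ?_)
  obtain ⟨a, b, hab⟩ := hsplit r hr
  simp [hab, pvParse, pvT, Function.comp]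

-- the Pre_-side distinct-pair count is the size of A's reporter set
theorem pv_pvCnt_eq (report : List String)
    (hsplit : ∀ r ∈ report, ∃ a b, PySem.Str.split₀ r = [a, b]) (b : String) :
    pvCnt report b = ((pvS (report.map pvParse) b).length : Int) := by
  unfold pvCnt
  rw [pv_split_eq_map report hsplit, List.filter_map]
  have hco : ((fun ts : List String => ts.getD 1 "" == b) ∘ pvT)
      = (fun p : String × String => p.2 == b) := by
    funext p
    simp [pvT, Function.comp]
  rw [hco, pv_ofList_map_inj pvT pv_pvT_inj, List.length_map]
  have h3 : pvS (report.map pvParse) b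
      = (PySem.Set.ofList ((report.map pvParse).filter (fun p => p.2 == b))).map Prod.fst := by
    rw [pvS, pvRl]
    exact pv_ofList_map_fst b _ (fun p hp => by simpa using (List.mem_filter.mp hp).2)
  rw [h3, List.length_map]

-- normal form of A: one Int per distinct id, counting qualifying reported users
theorem pv_A_norm (id_list report : List String) (k : Int)
    (hsplit : ∀ r ∈ report, ∃ a b, PySem.Str.split₀ r = [a, b] ∧ b ∈ id_list)
    (hqual : ∀ p ∈ report.map pvParse,
      k ≤ ((pvS (report.map pvParse) p.2).length : Int) → p.1 ∈ id_list) :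
    solution id_list report k
      = (PySem.Set.ofList id_list).map (fun i =>
          ((((PySem.Set.ofList id_list).filter
              (fun b => decide (k ≤ ((pvS (report.map pvParse) b).length : Int)))).flatMap
            (pvS (report.map pvParse))).count i : Int)) := by
  simp only [solution]
  have hP2 : ∀ p ∈ report.map pvParse, p.2 ∈ id_list := by
    intro p hp
    obtain ⟨r, hr, rfl⟩ := List.mem_map.mp hp
    obtain ⟨a, b, hab, hb⟩ := hsplit r hr
    simpa [pvParse, hab] using hb
  have hA1 : (report.foldl (fun d repo =>
      let ts := PySem.Str.split₀ repo
      if h : ts.length = 2 then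
        d.insert (ts[1]'(by omega))
          (PySem.Set.add (d.getD (ts[1]'(by omega)) PySem.Set.empty) (ts[0]'(by omega)))
      else d)
        (id_list.foldl (fun d i => d.insert i PySem.Set.empty) PySem.Dict.empty))
      = (report.map pvParse).foldl
          (fun d p => d.insert p.2 (PySem.Set.add (d.getD p.2 PySem.Set.empty) p.1))
          (id_list.foldl (fun d i => d.insert i PySem.Set.empty) PySem.Dict.empty) := by
    rw [List.foldl_map]
    refine (PySem.List.foldl_congr_mem report _ _ _ ?_)
    intro acc r hr
    obtain ⟨a, b, hab, _⟩ := hsplit r hr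
    simp [hab, pvParse]
  rw [hA1]
  have h0 : ∀ b, ((id_list.foldl (fun d i => d.insert i PySem.Set.empty)
      (PySem.Dict.empty : PySem.Dict String (PySem.Set String)))).getD b PySem.Set.empty
      = PySem.Set.empty := fun b =>
    pv_getD_insert_const id_list PySem.Set.empty PySem.Dict.empty b (PySem.Dict.getD_empty _ _)
  have hS : ∀ b, ((report.map pvParse).foldl
      (fun d p => d.insert p.2 (PySem.Set.add (d.getD p.2 PySem.Set.empty) p.1))
      (id_list.foldl (fun d i => d.insert i PySem.Set.empty) PySem.Dict.empty)).getD
        b PySem.Set.empty = pvS (report.map pvParse) b := by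
    intro b
    rw [pv_score_getD, h0 b]
    exact PySem.Set.update_nil_left _
  simp only [hS]
  have hkeys1 : ((report.map pvParse).foldl
      (fun d p => d.insert p.2 (PySem.Set.add (d.getD p.2 PySem.Set.empty) p.1))
      (id_list.foldl (fun d i => d.insert i PySem.Set.empty) PySem.Dict.empty)).keys
      = PySem.Set.ofList id_list := by
    rw [PySem.Dict.keys_foldl_insert_key (report.map pvParse) Prod.snd
        (fun d p => PySem.Set.add (d.getD p.2 PySem.Set.empty) p.1) _,
      PySem.Dict.keys_foldl_insert id_list (fun _ _ => PySem.Set.empty) PySem.Dict.empty,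
      PySem.Dict.keys_empty]
    rw [show PySem.Set.update ([] : PySem.Set String) id_list = PySem.Set.ofList id_list from
      PySem.Set.update_nil_left _]
    refine pv_update_of_subset _ _ ?_
    intro x hx
    obtain ⟨p, hp, rfl⟩ := List.mem_map.mp hx
    exact (PySem.Set.mem_ofList _ _).mpr (hP2 p hp)
  rw [hkeys1]
  have huser0keys : (List.foldl (fun d i => d.insert i 0)
      (PySem.Dict.empty : PySem.Dict String Int) id_list).keys = PySem.Set.ofList id_list := by
    rw [PySem.Dict.keys_foldl_insert id_list (fun _ _ => (0 : Int)) PySem.Dict.empty,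
      PySem.Dict.keys_empty]
    exact PySem.Set.update_nil_left _
  have hmem : ∀ b, k ≤ ((pvS (report.map pvParse) b).length : Int) →
      ∀ a ∈ pvS (report.map pvParse) b,
      a ∈ (List.foldl (fun d i => d.insert i 0)
        (PySem.Dict.empty : PySem.Dict String Int) id_list).keys := by
    intro b hc a ha
    rw [pvS, PySem.Set.mem_ofList, pvRl] at ha
    obtain ⟨p, hp, rfl⟩ := List.mem_map.mp ha
    have hpb : p.2 = b := by simpa using (List.mem_filter.mp hp).2
    rw [huser0keys, PySem.Set.mem_ofList]
    exact hqual p (List.mem_filter.mp hp).1 (by rw [hpb]; exact hc)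
  have hfk := pv_outer_keys (pvS (report.map pvParse))
      (fun b => k ≤ ((pvS (report.map pvParse) b).length : Int))
      (PySem.Set.ofList id_list) _ hmem
  rw [PySem.Dict.values_eq_map_keys _ (by rw [hfk, huser0keys]; exact PySem.Set.nodup_ofList _) 0,
    hfk, huser0keys]
  refine List.map_congr_left (fun i _ => ?_)
  rw [pv_outer_getD,
    pv_getD_insert_const id_list 0 PySem.Dict.empty i (PySem.Dict.getD_empty _ _), zero_add]

-- normal form of B: the same tally as a direct countP over the deduplicated pair set
theorem pv_B_norm (id_list report : List String) (k : Int)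
    (hsplit : ∀ r ∈ report, ∃ a b, PySem.Str.split₀ r = [a, b]) :
    solution_alt id_list report k
      = (PySem.Set.ofList id_list).map (fun i =>
          (((PySem.Set.ofList (report.map pvParse)).countP
              (fun p => p.1 == i &&
                decide (k ≤ ((pvS (report.map pvParse) p.2).length : Int)))) : Int)) := by
  simp only [solution_alt]
  rw [pv_split_eq_map report hsplit, pv_ofList_map_inj pvT pv_pvT_inj,
    PySem.List.dedup_eq_ofList]
  refine List.map_congr_left (fun i _ => ?_)
  rw [List.countP_map]
  have hq : ∀ b : String,
      (((PySem.Set.ofList (report.map pvParse)).map pvT).countP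
          (fun q => q.getD 1 "" == b) : Int)
        = ((pvS (report.map pvParse) b).length : Int) := by
    intro b
    rw [List.countP_map]
    have hco : ((fun q : List String => q.getD 1 "" == b) ∘ pvT)
        = (fun p : String × String => p.2 == b) := by
      funext p; simp [pvT, Function.comp]
    rw [hco]
    have : (PySem.Set.ofList (report.map pvParse)).countP
        (fun p : String × String => p.2 == b)
        = ((PySem.Set.ofList (report.map pvParse)).map Prod.snd).count b := by
      rw [List.count_eq_countP, List.countP_map]
      rfl
    rw [this, ← pv_cnt_eq]
  have hpred : ((fun p : List String =>
        p.getD 0 "" == i &&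
          decide (k ≤ (((PySem.Set.ofList (report.map pvParse)).map pvT).countP
            (fun q => q.getD 1 "" == p.getD 1 "") : Int))) ∘ pvT)
      = (fun p : String × String =>
          p.1 == i && decide (k ≤ ((pvS (report.map pvParse) p.2).length : Int))) := by
    funext p
    have e0 : (pvT p).getD 0 "" = p.1 := rfl
    have e1 : (pvT p).getD 1 "" = p.2 := rfl
    simp only [Function.comp_apply, e0, e1, hq]
  rw [hpred]

-- ===== VERDICT (by name: the statement is the Claim_ definition above) =====
theorem solution_spec : Claim_equal_solution := by
  intro id_list report k _hdom hpre
  unfold Spec_solution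
  unfold Pre_solution at hpre
  rw [List.all_eq_true] at hpre
  have hsplit : ∀ r ∈ report, ∃ a b, PySem.Str.split₀ r = [a, b] ∧ b ∈ id_list := by
    intro r hr
    have h := hpre r hr
    rw [Bool.and_assoc, Bool.and_eq_true] at h
    obtain ⟨hlen, hrest⟩ := h
    obtain ⟨a, b, hab⟩ := List.length_eq_two.mp (by simpa using hlen)
    rw [Bool.and_eq_true] at hrest
    refine ⟨a, b, hab, ?_⟩
    have := hrest.1
    rw [hab] at this
    simpa using this
  have hsplit2 : ∀ r ∈ report, ∃ a b, PySem.Str.split₀ r = [a, b] := by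
    intro r hr
    obtain ⟨a, b, hab, _⟩ := hsplit r hr
    exact ⟨a, b, hab⟩
  have hP2 : ∀ p ∈ report.map pvParse, p.2 ∈ id_list := by
    intro p hp
    obtain ⟨r, hr, rfl⟩ := List.mem_map.mp hp
    obtain ⟨a, b, hab, hb⟩ := hsplit r hr
    simpa [pvParse, hab] using hb
  have hqual : ∀ p ∈ report.map pvParse,
      k ≤ ((pvS (report.map pvParse) p.2).length : Int) → p.1 ∈ id_list := by
    intro p hp hk
    obtain ⟨r, hr, rfl⟩ := List.mem_map.mp hp
    obtain ⟨a, b, hab⟩ := hsplit2 r hr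
    have h := hpre r hr
    rw [Bool.and_assoc, Bool.and_eq_true, Bool.and_eq_true] at h
    have hor := h.2.2
    rw [Bool.or_eq_true] at hor
    cases hor with
    | inl ha => simpa [pvParse, hab] using ha
    | inr hlt =>
      exfalso
      have hcnt := pv_pvCnt_eq report hsplit2 ((PySem.Str.split₀ r).getD 1 "")
      rw [decide_eq_true_iff] at hlt
      rw [hcnt] at hlt
      have : (pvParse r).2 = (PySem.Str.split₀ r).getD 1 "" := rfl
      rw [this] at hk
      omega
  rw [pv_A_norm id_list report k hsplit hqual, pv_B_norm id_list report k hsplit2]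
  refine List.map_congr_left (fun i _ => ?_)
  rw [← pv_count_transfer id_list (report.map pvParse) hP2
    (fun b => decide (k ≤ ((pvS (report.map pvParse) b).length : Int))) i]
  rw [List.count_eq_countP, List.countP_map, List.countP_filter]
  congr 1
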